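-- pv_equiv track=rewrite | github.com/teddyljh/reinhardt | construct315B.py | print_gaps
-- ===== SOURCE A (Python) =====
-- def print_gaps(array):
--     zero = 0
--     poly = []
--     n = len(array)
--     for i in range(1,n):
--         if array[i] == 0 or array[i] == '0':
--             zero+=1
--         elif array[i] == 1 or array[i] == '+' or array[i] == -1 or array[i] == '-':
--             #print zero+1,
--             poly.append(zero+1)
--             zero = 0
--     #print zero+1
--     poly.append(zero+1)
--
--     return poly
-- ===== SOURCE B (Python) =====
-- def print_gaps(array):
--     # Different decomposition: repeatedly locate the next marker (first-match scan),
--     # count the zeros in the segment before it with list.count, then continue after it.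
--     poly = []
--     seg = array[1:]
--     while True:
--         found = None
--         for j, x in enumerate(seg):
--             if x == 1 or x == '+' or x == -1 or x == '-':
--                 found = j
--                 break
--         if found is None:
--             poly.append(seg.count(0) + 1)
--             return poly
--         poly.append(seg[:found].count(0) + 1)
--         seg = seg[found + 1:]
-- ===== Notes on version B (the rewrite author's own statement) =====
-- stated objective: alternative
-- what changed: Replaces A's single pass with a running zero-counter by a segment decomposition: repeatedly scan for the next marker (first-match search), count the zeros of the preceding segment with list.count, and continue on the remainder after the marker.
import Mathlib
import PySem

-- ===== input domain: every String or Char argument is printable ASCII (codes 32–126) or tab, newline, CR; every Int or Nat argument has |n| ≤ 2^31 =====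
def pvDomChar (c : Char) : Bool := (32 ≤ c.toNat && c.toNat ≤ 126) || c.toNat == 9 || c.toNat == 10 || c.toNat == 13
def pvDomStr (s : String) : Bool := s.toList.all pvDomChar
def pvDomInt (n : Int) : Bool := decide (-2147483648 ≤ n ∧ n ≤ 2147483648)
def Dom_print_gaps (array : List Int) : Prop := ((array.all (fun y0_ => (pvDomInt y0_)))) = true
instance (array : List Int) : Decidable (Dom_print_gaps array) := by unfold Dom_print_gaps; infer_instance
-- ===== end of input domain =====

-- B replaces A's running zero-counter by repeated first-marker search plus segment zero-counts (objective: alternative decomposition).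

-- ===== PORT A =====
-- literal port: i ranges over [1, n); array[i] is always in range, so pyGetD is exact
def print_gaps (array : List Int) : List Int :=
  let n : Int := array.length
  let st := (PySem.List.pyRange 1 n).foldl
    (fun (st : Int × List Int) i =>
      let x := PySem.List.pyGetD array i 0
      if x == 0 then (st.1 + 1, st.2)
      else if x == 1 || x == -1 then (0, st.2 ++ [st.1 + 1])
      else st) (0, [])
  st.2 ++ [st.1 + 1]

-- ===== PORT B =====
-- port of Source B's marker test (the '+'/'-' string branches cannot fire on an Int element)
def pvIsMark (x : Int) : Bool := x == 1 || x == -1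

-- port of Source B's 'while True' loop: first-match scan = findIdx?, then slice and count
def pvGapsLoop (poly : List Int) (seg : List Int) : List Int :=
  match h : seg.findIdx? pvIsMark with
  | none => poly ++ [(PySem.List.count seg 0 : Int) + 1]
  | some j =>
      pvGapsLoop
        (poly ++ [(PySem.List.count (PySem.List.slice seg none (some (j : Int))) 0 : Int) + 1])
        (PySem.List.slice seg (some ((j : Int) + 1)) none)
termination_by seg.length
decreasing_by
  have hj : j < seg.length := by
    have := List.findIdx?_eq_some_iff_findIdx_eq.mp h
    omega
  have hcast : ((j : Int) + 1) = ((j + 1 : Nat) : Int) := by push_cast; ring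
  rw [hcast, PySem.List.slice_from_natCast]
  simp [List.length_drop]
  omega

def print_gaps_alt (array : List Int) : List Int :=
  pvGapsLoop [] (PySem.List.slice array (some 1) none)

-- ===== PRECONDITION & SPEC =====
def Spec_print_gaps (array : List Int) (out : List Int) : Prop := out = print_gaps_alt array
instance (array : List Int) (out : List Int) : Decidable (Spec_print_gaps array out) := by unfold Spec_print_gaps; infer_instance

-- ===== CLAIM (what is proved, stated in full; the proofs are below) =====
def Claim_equal_print_gaps : Prop := ∀ (array : List Int), Dom_print_gaps array → Spec_print_gaps array (print_gaps array)

-- ===== LEMMAS AND PROOFS =====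

-- reference description of both programs: gap list of a value sequence, z = zeros seen so far
def pvGaps : List Int → Int → List Int
  | [], z => [z + 1]
  | x :: xs, z =>
    if x = 0 then pvGaps xs (z + 1)
    else if x = 1 ∨ x = -1 then (z + 1) :: pvGaps xs 0
    else pvGaps xs z

def pvStepA (st : Int × List Int) (x : Int) : Int × List Int :=
  if x == 0 then (st.1 + 1, st.2)
  else if x == 1 || x == -1 then (0, st.2 ++ [st.1 + 1])
  else st

lemma lemA (xs : List Int) (z : Int) (acc : List Int) :
    (xs.foldl pvStepA (z, acc)).2 ++ [(xs.foldl pvStepA (z, acc)).1 + 1] = acc ++ pvGaps xs z := by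
  induction xs generalizing z acc with
  | nil => simp [pvGaps]
  | cons x xs ih =>
    simp only [List.foldl_cons, pvGaps, pvStepA]
    by_cases h0 : x = 0
    · simp [h0, ih]
    · by_cases hm : x = 1 ∨ x = -1
      · have : (x == 1 || x == -1) = true := by
          rcases hm with h | h <;> simp [h]
        simp [h0, hm, this, ih]
      · have : (x == 1 || x == -1) = false := by
          simp only [Bool.or_eq_false_iff, beq_eq_false_iff_ne]
          exact ⟨fun h => hm (Or.inl h), fun h => hm (Or.inr h)⟩
        simp [h0, hm, this, ih]

lemma pvGaps_none (xs : List Int) (z : Int)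
    (h : xs.findIdx? pvIsMark = none) :
    pvGaps xs z = [z + (List.count 0 xs : Int) + 1] := by
  induction xs generalizing z with
  | nil => simp [pvGaps]
  | cons x xs ih =>
    rw [List.findIdx?_cons] at h
    cases hmk : pvIsMark x with
    | true => rw [hmk] at h; simp at h
    | false =>
      rw [hmk] at h
      simp only [Bool.false_eq_true, if_false, Option.map_eq_none_iff] at h
      have hne : ¬ (x = 1 ∨ x = -1) := by
        simp [pvIsMark] at hmk; omega
      by_cases h0 : x = 0
      · simp only [pvGaps, if_pos h0]
        rw [ih _ h]
        subst h0
        rw [List.count_cons_self]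
        simp only [List.cons.injEq, and_true]
        push_cast; ring
      · simp only [pvGaps, if_neg h0, if_neg hne]
        rw [ih _ h]
        have hc : List.count 0 (x :: xs) = List.count 0 xs := by
          rw [List.count_cons]
          simp [h0]
        rw [hc]

lemma pvGaps_some (xs : List Int) (z : Int) (j : Nat)
    (h : xs.findIdx? pvIsMark = some j) :
    pvGaps xs z = (z + (List.count 0 (xs.take j) : Int) + 1) :: pvGaps (xs.drop (j + 1)) 0 := by
  induction xs generalizing z j with
  | nil => simp at h
  | cons x xs ih =>
    rw [List.findIdx?_cons] at h
    cases hmk : pvIsMark x with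
    | true =>
      rw [hmk] at h
      simp at h
      have hj0 : j = 0 := by omega
      subst hj0
      have hm : x = 1 ∨ x = -1 := by
        simp [pvIsMark] at hmk; omega
      have h0 : x ≠ 0 := by rcases hm with h' | h' <;> simp [h']
      simp [pvGaps, h0, hm]
    | false =>
      rw [hmk] at h
      simp only [Bool.false_eq_true, if_false, Option.map_eq_some_iff] at h
      obtain ⟨j', hj', hj⟩ := h
      subst hj
      have hne : ¬ (x = 1 ∨ x = -1) := by
        simp [pvIsMark] at hmk; omega
      by_cases h0 : x = 0
      · simp only [pvGaps, if_pos h0]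
        rw [ih _ _ hj']
        subst h0
        simp only [List.take_succ_cons, List.drop_succ_cons, List.count_cons_self,
          List.cons.injEq, and_true]
        push_cast; ring
      · simp only [pvGaps, if_neg h0, if_neg hne]
        rw [ih _ _ hj']
        have hc : List.count 0 (x :: List.take j' xs) = List.count 0 (List.take j' xs) := by
          rw [List.count_cons]
          simp [h0]
        simp only [List.take_succ_cons, List.drop_succ_cons, hc]

lemma lemB (seg : List Int) (poly : List Int) :
    pvGapsLoop poly seg = poly ++ pvGaps seg 0 := by
  induction hlen : seg.length using Nat.strong_induction_on generalizing seg poly with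
  | _ n ih =>
    rw [pvGapsLoop]
    split
    · next h =>
      rw [pvGaps_none seg 0 h, PySem.List.count_eq]
      simp
    · next j h =>
      have hj : j < seg.length := by
        have := List.findIdx?_eq_some_iff_findIdx_eq.mp h
        omega
      have hcast : ((j : Int) + 1) = ((j + 1 : Nat) : Int) := by push_cast; ring
      rw [hcast, PySem.List.slice_from_natCast, PySem.List.slice_to_natCast]
      rw [ih ((seg.drop (j+1)).length) (by simp [List.length_drop]; omega) _ _ rfl]
      rw [pvGaps_some seg 0 j h, PySem.List.count_eq]
      simp

-- ===== VERDICT (by name: the statement is the Claim_ definition above) =====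
theorem print_gaps_spec : Claim_equal_print_gaps := by
  intro array _
  show print_gaps array = print_gaps_alt array
  unfold print_gaps print_gaps_alt
  have hA : (fun (st : Int × List Int) i =>
      let x := PySem.List.pyGetD array i 0
      if x == 0 then (st.1 + 1, st.2)
      else if x == 1 || x == -1 then (0, st.2 ++ [st.1 + 1])
      else st) = (fun (st : Int × List Int) i => pvStepA st (PySem.List.pyGetD array i 0)) := rfl
  simp only [hA]
  rw [PySem.List.foldl_pyRange_pyGetD' array 0 pvStepA (0, []) (by norm_num)]
  rw [PySem.List.slice_from_one, lemB]
  have : (1 : Int).toNat = 1 := rfl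
  rw [this]
  exact (lemA (array.drop 1) 0 []).trans (by rw [← List.drop_one])
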